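-- pv_equiv track=rewrite | github.com/TANG-guoguo/myPrivNUD | NUDTOOL.py | calculate_glist
-- ===== SOURCE A (Python) =====
-- import math
--
-- def calculate_glist(D):
--     '''返回D的所有因子的有序列表glist'''
--     assert D>=0
--     if D==1:
--         return [1]
--     glist=[]
--     for factor in range(1,int(math.sqrt(D))+1):
--         if D % factor ==0:
--             glist.append(factor)
--             if factor != int(D/factor):
--                 glist.append(int(D/factor))
--     glist.sort()
--     glist.remove(1)
--     return glist
-- ===== SOURCE B (Python) =====
-- def calculate_glist(D):
--     '''Sorted divisors of D without 1: factor D into primes by trial division,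
--     then grow the divisor set multiplicatively, one prime at a time.'''
--     assert D >= 0
--     if D == 1:
--         return [1]
--     primes = []
--     n = D
--     p = 2
--     while p * p <= n:
--         if n % p == 0:
--             primes.append(p)
--             n //= p
--         else:
--             p += 1
--     if n > 1:
--         primes.append(n)
--     divs = {1}
--     for q in primes:
--         divs |= {d * q for d in divs}
--     divs.discard(1)
--     return sorted(divs)
-- ===== Notes on version B (the rewrite author's own statement) =====
-- stated objective: alternative
-- what changed: B replaces A's sqrt-bounded divisor-pair enumeration plus sort plus remove(1) with a prime-factorisation algorithm: it factors D into primes by trial division and then grows the set of divisors multiplicatively, one prime factor at a time, finally discarding 1 and sorting the set.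
-- outside the precondition, e.g. on calculate_glist(0): A raises ValueError, B returns []
import Mathlib
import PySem

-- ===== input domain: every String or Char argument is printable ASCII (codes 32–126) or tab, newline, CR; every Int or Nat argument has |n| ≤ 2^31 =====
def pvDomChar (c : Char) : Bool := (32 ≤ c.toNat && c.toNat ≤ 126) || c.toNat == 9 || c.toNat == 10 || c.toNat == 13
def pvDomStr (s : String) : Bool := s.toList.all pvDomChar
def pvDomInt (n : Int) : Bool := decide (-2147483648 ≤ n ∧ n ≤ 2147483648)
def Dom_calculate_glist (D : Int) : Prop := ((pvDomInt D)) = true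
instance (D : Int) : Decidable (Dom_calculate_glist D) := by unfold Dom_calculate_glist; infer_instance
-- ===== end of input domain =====

-- B replaces A's sqrt-bounded divisor-pair enumeration + sort + remove(1) by prime
-- factorisation followed by multiplicative divisor-set generation ('alternative';
-- similar cost). A mutates nothing observable; equivalence is about the return value.

-- ===== PORT A =====
-- int(math.sqrt(D)) : for 0 ≤ D ≤ 2^31 the correctly rounded float sqrt truncates to the
-- integer square root (checked against CPython on the whole domain), so it is Nat.sqrt.
def calculate_glist (D : Int) : List Int :=
  if D = 1 then [1]
  else
    let s : Int := ((D.toNat.sqrt : Nat) : Int)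
    let glist :=
      (PySem.List.pyRange 1 (s + 1) 1).foldl
        (fun acc factor =>
          if PySem.Int.mod D factor = 0 then
            let acc := acc ++ [factor]
            if factor ≠ PySem.Int.truncdiv D factor then
              acc ++ [PySem.Int.truncdiv D factor]
            else acc
          else acc) []
    let glist := PySem.List.sorted glist (fun x => x) false
    (PySem.List.remove? glist 1).getD []   -- none = ValueError, excluded by Pre_

-- ===== PORT B =====
-- Source B's factorisation loop (while p*p<=n: divide n by p or advance p; finally append
-- the remaining prime cofactor if any). fuel only makes the recursion total; for every
-- D ≥ 1 admitted by Pre_ the initial fuel 3*D+1 is proved sufficient (pvFactorLoopSpec).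
def pvFactorLoop (fuel : Nat) (n p : Int) (primes : List Int) : List Int :=
  match fuel with
  | 0 => primes
  | fuel + 1 =>
    if p * p ≤ n then
      if PySem.Int.mod n p = 0 then
        pvFactorLoop fuel (PySem.Int.floordiv n p) p (primes ++ [p])
      else
        pvFactorLoop fuel n (p + 1) primes
    else if 1 < n then primes ++ [n] else primes

def calculate_glist_alt (D : Int) : List Int :=
  if D = 1 then [1]
  else
    let primes := pvFactorLoop (3 * D.toNat + 1) D 2 []
    let divs := primes.foldl
      (fun s q => PySem.Set.union s (PySem.Set.ofList (List.map (fun d => d * q) s)))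
      (PySem.Set.ofList [1])
    let divs := PySem.Set.discard divs 1
    PySem.List.sorted divs (fun x => x) false

-- ===== PRECONDITION & SPEC =====
-- Pre_ excludes exactly the inputs where A raises: D < 0 (assert) and D = 0
-- (glist.remove(1) on the empty list raises ValueError).
def Pre_calculate_glist (D : Int) : Prop := 1 ≤ D
instance (D : Int) : Decidable (Pre_calculate_glist D) := by unfold Pre_calculate_glist; infer_instance
def pvWitness_calculate_glist : Int := (12)

def Spec_calculate_glist (D : Int) (out : List Int) : Prop := out = calculate_glist_alt D
instance (D : Int) (out : List Int) : Decidable (Spec_calculate_glist D out) := by unfold Spec_calculate_glist; infer_instance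

-- ===== CLAIM (what is proved, stated in full; the proofs are below) =====
def Claim_equal_calculate_glist : Prop := ∀ (D : Int), Dom_calculate_glist D → Pre_calculate_glist D → Spec_calculate_glist D (calculate_glist D)

-- ===== LEMMAS AND PROOFS =====

-- the integer square root A bounds its loop with
def pvS (D : Int) : Int := ((D.toNat.sqrt : Nat) : Int)
-- "f is a divisor" and "f is a divisor whose cofactor differs from f"
def pvP (D f : Int) : Bool := D % f == 0
def pvQ (D f : Int) : Bool := D % f == 0 && f * f != D

lemma pvS_spec (D : Int) (hD : 1 ≤ D) :
    1 ≤ pvS D ∧ pvS D * pvS D ≤ D ∧ D < (pvS D + 1) * (pvS D + 1) := by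
  have hn : ((D.toNat : Int)) = D := Int.toNat_of_nonneg (by omega)
  have h3 : 0 < D.toNat.sqrt := Nat.sqrt_pos.mpr (by omega)
  refine ⟨by simp [pvS]; omega, ?_, ?_⟩
  · have h1 := Nat.sqrt_le D.toNat
    simp only [pvS]
    calc ((D.toNat.sqrt : Nat) : Int) * ((D.toNat.sqrt : Nat) : Int)
        = ((D.toNat.sqrt * D.toNat.sqrt : Nat) : Int) := by push_cast; ring
      _ ≤ ((D.toNat : Nat) : Int) := by exact_mod_cast h1
      _ = D := hn
  · have h2 := Nat.lt_succ_sqrt D.toNat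
    rw [Nat.succ_eq_add_one] at h2
    simp only [pvS]
    calc D = ((D.toNat : Nat) : Int) := hn.symm
      _ < (((D.toNat.sqrt + 1) * (D.toNat.sqrt + 1) : Nat) : Int) := by exact_mod_cast h2
      _ = (((D.toNat.sqrt : Nat) : Int) + 1) * (((D.toNat.sqrt : Nat) : Int) + 1) := by push_cast; ring

lemma pvGuard_eq (D f : Int) (hf : 1 ≤ f) (hdvd : f ∣ D) : f = D / f ↔ f * f = D := by
  constructor
  · intro h
    calc f * f = D / f * f := by rw [← h]
      _ = D := Int.ediv_mul_cancel hdvd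
  · intro h; rw [← h, Int.mul_ediv_cancel_left _ (by omega)]

-- A's fold body appends, per factor, the block (small part ++ large part)
lemma pvBodyA (D f : Int) (acc : List Int) (hf : 1 ≤ f) :
    (if PySem.Int.mod D f = 0 then
      let acc := acc ++ [f]
      if f ≠ PySem.Int.truncdiv D f then acc ++ [PySem.Int.truncdiv D f] else acc
     else acc)
    = acc ++ ((if pvP D f then [f] else []) ++ (if pvQ D f then [D / f] else [])) := by
  have hm : PySem.Int.mod D f = D % f := PySem.Int.mod_eq_emod_of_pos (by omega)
  simp only [hm]
  by_cases h : D % f = 0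
  · have hdvd : f ∣ D := Int.dvd_of_emod_eq_zero h
    have htd : PySem.Int.truncdiv D f = D / f := by
      simp only [PySem.Int.truncdiv]; exact Int.tdiv_eq_ediv_of_dvd hdvd
    have hguard := pvGuard_eq D f hf hdvd
    rw [if_pos h]
    show (if f ≠ PySem.Int.truncdiv D f then (acc ++ [f]) ++ [PySem.Int.truncdiv D f]
          else acc ++ [f]) = _
    rw [htd]
    by_cases h2 : f * f = D
    · rw [if_neg (by simpa using hguard.mpr h2)]
      simp [pvP, pvQ, h, h2]
    · rw [if_pos (fun hc => h2 (hguard.mp hc))]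
      simp [pvP, pvQ, h, h2]
  · rw [if_neg h]; simp [pvP, pvQ, h]

lemma pvAFold (D : Int) :
    (PySem.List.pyRange 1 (pvS D + 1) 1).foldl
      (fun acc factor =>
        if PySem.Int.mod D factor = 0 then
          let acc := acc ++ [factor]
          if factor ≠ PySem.Int.truncdiv D factor then acc ++ [PySem.Int.truncdiv D factor] else acc
        else acc) []
    = (PySem.List.pyRange 1 (pvS D + 1) 1).flatMap
        (fun f => (if pvP D f then [f] else []) ++ (if pvQ D f then [D / f] else [])) := by
  rw [PySem.List.foldl_congr_mem _ _
        (fun acc f => acc ++ ((if pvP D f then [f] else []) ++ (if pvQ D f then [D / f] else []))) _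
        (by
          intro acc x hx
          have hx1 : 1 ≤ x := (PySem.List.mem_pyRange_one.mp hx).1
          exact pvBodyA D x acc hx1)]
  rw [PySem.List.foldl_append_eq_flatMap]
  simp

lemma pvFlatMapS (D : Int) (l : List Int) :
    l.flatMap (fun f => if pvP D f then [f] else []) = l.filter (pvP D) := by
  induction l with
  | nil => simp
  | cons a l ih => by_cases h : pvP D a <;> simp [h, ih]

lemma pvFlatMapL (D : Int) (l : List Int) :
    l.flatMap (fun f => if pvQ D f then [D / f] else [])
      = (l.filter (pvQ D)).map (fun f => D / f) := by
  induction l with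
  | nil => simp
  | cons a l ih => by_cases h : pvQ D a <;> simp [h, ih]

lemma pvFlatMapPerm {α β : Type} [DecidableEq β] (l : List α) (g h : α → List β) :
    (l.flatMap (fun a => g a ++ h a)).Perm (l.flatMap g ++ l.flatMap h) := by
  induction l with
  | nil => simp
  | cons a l ih =>
    simp only [List.flatMap_cons]
    rw [List.perm_iff_count] at ih ⊢
    intro x
    simp only [List.count_append, ih x]
    omega

lemma pvDivAnti (D a b : Int) (hD : 1 ≤ D) (ha : 1 ≤ a) (hab : a < b)
    (hda : a ∣ D) (hdb : b ∣ D) : D / b < D / a := by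
  obtain ⟨x, hx⟩ := hda
  obtain ⟨y, hy⟩ := hdb
  have e1 : D / a = x := by rw [hx, Int.mul_ediv_cancel_left _ (by omega)]
  have e2 : D / b = y := by rw [hy, Int.mul_ediv_cancel_left _ (by omega)]
  rw [e1, e2]
  have hy1 : 1 ≤ y := by nlinarith
  have h4 : a * y < b * y := by nlinarith
  have h5 : a * y < a * x := by omega
  exact lt_of_mul_lt_mul_left h5 (by omega)

lemma pvCross (D f : Int) (hD : 1 ≤ D) (hf : 1 ≤ f) (hfs : f ≤ pvS D)
    (hdvd : f ∣ D) (hne : f * f ≠ D) : pvS D < D / f := by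
  obtain ⟨hs1, hs2, hs3⟩ := pvS_spec D hD
  obtain ⟨y, hy⟩ := hdvd
  have e0 : D / f = y := by rw [hy, Int.mul_ediv_cancel_left _ (by omega)]
  rw [e0]
  have hy1 : 1 ≤ y := by nlinarith
  by_contra hc
  push Not at hc
  have h1 : f * y ≤ pvS D * y := by nlinarith
  have h2 : pvS D * y ≤ pvS D * pvS D := by nlinarith
  have e1 : f * y = pvS D * pvS D := by omega
  have ef : f = pvS D := by nlinarith
  have ey : y = pvS D := by nlinarith
  exact hne (by rw [hy, ef, ey])

-- an integer p ≥ 2 with no divisor in [2, p) is prime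
lemma pvPrimeOfDivisors (p : Int) (h2 : 2 ≤ p)
    (h : ∀ m : Int, 2 ≤ m → m < p → ¬ m ∣ p) : Prime p := by
  rw [Int.prime_iff_natAbs_prime, show p.natAbs = p.toNat by omega, Nat.prime_def_lt]
  refine ⟨by omega, fun m hlt hdvd => ?_⟩
  by_contra hm1
  have hm0 : m ≠ 0 := by rintro rfl; rw [Nat.zero_dvd] at hdvd; omega
  have hdZ : (m : ℤ) ∣ p := by
    have h' : (m : ℤ) ∣ ((p.toNat : ℕ) : ℤ) := Int.natCast_dvd_natCast.mpr hdvd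
    rwa [show ((p.toNat : ℕ) : ℤ) = p by omega] at h'
  exact h m (by omega) (by omega) hdZ

-- the factorisation loop: with enough fuel it appends a list of primes whose product is n
lemma pvFactorLoopSpec : ∀ (fuel : Nat) (n p : Int) (primes : List Int),
    1 ≤ n → 2 ≤ p → p ≤ n + 1 →
    (∀ q : Int, 2 ≤ q → q < p → ¬ q ∣ n) →
    3 * n.toNat + 3 ≤ fuel + p.toNat →
    ∃ L : List Int, pvFactorLoop fuel n p primes = primes ++ L ∧
      L.prod = n ∧ (∀ x ∈ L, Prime x ∧ 2 ≤ x) := by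
  intro fuel
  induction fuel with
  | zero => intro n p primes h1 h2 h3 _ hf; exfalso; omega
  | succ fuel ih =>
    intro n p primes h1 h2 h3 hq hf
    rw [pvFactorLoop]
    by_cases hpn : p * p ≤ n
    · rw [if_pos hpn]
      have hmEq : PySem.Int.mod n p = n % p := PySem.Int.mod_eq_emod_of_pos (by omega)
      by_cases hmod : n % p = 0
      · rw [if_pos (by rw [hmEq]; exact hmod)]
        have hdvd : p ∣ n := Int.dvd_of_emod_eq_zero hmod
        have hfl : PySem.Int.floordiv n p = n / p := PySem.Int.floordiv_eq_ediv_of_pos (by omega)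
        rw [hfl]
        have hple : p ≤ n / p := by rw [Int.le_ediv_iff_mul_le (by omega)]; linarith
        have hlt : n / p < n := by
          apply Int.ediv_lt_of_lt_mul (by omega); nlinarith
        have hnn : 0 ≤ n / p := Int.ediv_nonneg (by omega) (by omega)
        have hcan : p * (n / p) = n := Int.mul_ediv_cancel' hdvd
        obtain ⟨L, hL, hprod, hprime⟩ := ih (n / p) p (primes ++ [p]) (by omega) h2 (by omega)
          (fun q hq2 hqp hqd => hq q hq2 hqp (hqd.trans (Int.ediv_dvd_of_dvd hdvd)))
          (by omega)
        refine ⟨p :: L, by rw [hL]; simp, by rw [List.prod_cons, hprod]; exact hcan, ?_⟩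
        intro x hx
        rcases List.mem_cons.mp hx with rfl | hx
        · exact ⟨pvPrimeOfDivisors x h2 (fun m hm2 hmp hmd => hq m hm2 hmp (hmd.trans hdvd)), h2⟩
        · exact hprime x hx
      · rw [if_neg (by rw [hmEq]; exact hmod)]
        have hpn' : p ≤ n := by nlinarith
        refine ih n (p + 1) primes h1 (by omega) (by omega) ?_ (by omega)
        intro q hq2 hqp hqd
        by_cases hqp' : q < p
        · exact hq q hq2 hqp' hqd
        · have : q = p := by omega
          subst this
          exact hmod (Int.emod_eq_zero_of_dvd hqd)
    · rw [if_neg hpn]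
      push Not at hpn
      by_cases hn1 : 1 < n
      · rw [if_pos hn1]
        refine ⟨[n], rfl, by simp, ?_⟩
        intro x hx; rw [List.mem_singleton] at hx; subst hx
        refine ⟨pvPrimeOfDivisors x (by omega) ?_, by omega⟩
        intro m hm2 hmn hmd
        obtain ⟨c, hc⟩ := hmd
        by_cases hmp : m < p
        · exact hq m hm2 hmp ⟨c, hc⟩
        · have hc1 : 1 ≤ c := by nlinarith
          have hc2 : c ≠ 1 := by intro h'; rw [h', mul_one] at hc; omega
          have hcp : c < p := by nlinarith
          exact hq c (by omega) hcp ⟨m, by rw [hc]; ring⟩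
      · rw [if_neg hn1]
        exact ⟨[], by simp, by simp only [List.prod_nil]; omega, by simp⟩

-- multiplying the divisor set of M by each prime of L gives the divisor set of M * L.prod
lemma pvFoldSpec : ∀ (L : List Int) (s : List Int) (M : Int), 0 < M →
    (∀ x ∈ L, Prime x ∧ 2 ≤ x) → s.Nodup → (∀ d, d ∈ s ↔ 0 < d ∧ d ∣ M) →
    (L.foldl (fun s q => PySem.Set.union s (PySem.Set.ofList (List.map (fun d => d * q) s))) s).Nodup ∧
    (∀ d, d ∈ L.foldl (fun s q => PySem.Set.union s (PySem.Set.ofList (List.map (fun d => d * q) s))) s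
        ↔ 0 < d ∧ d ∣ M * L.prod) := by
  intro L
  induction L with
  | nil =>
    intro s M hM _ hnd hs
    refine ⟨hnd, ?_⟩
    simpa using hs
  | cons q L ih =>
    intro s M hM hP hnd hs
    obtain ⟨hqP, hq2⟩ := hP q (by simp)
    simp only [List.foldl_cons, List.prod_cons]
    have hstep : ∀ d, d ∈ PySem.Set.union s (PySem.Set.ofList (List.map (fun d => d * q) s))
        ↔ 0 < d ∧ d ∣ M * q := by
      intro d
      rw [PySem.Set.mem_union, PySem.Set.mem_ofList, List.mem_map]
      constructor
      · rintro (hds | ⟨e, hes, rfl⟩)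
        · obtain ⟨hd0, hdM⟩ := (hs d).mp hds
          exact ⟨hd0, hdM.mul_right q⟩
        · obtain ⟨he0, heM⟩ := (hs e).mp hes
          exact ⟨by nlinarith, mul_dvd_mul heM dvd_rfl⟩
      · rintro ⟨hd0, hdMq⟩
        by_cases hqd : q ∣ d
        · obtain ⟨e, rfl⟩ := hqd
          right
          have heM : e ∣ M := by
            obtain ⟨c, hc⟩ := hdMq
            exact ⟨c, mul_left_cancel₀ (show q ≠ 0 by omega)
              (by rw [mul_comm q M, hc]; ring)⟩
          have he0 : 0 < e := by nlinarith
          exact ⟨e, (hs e).mpr ⟨he0, heM⟩, by ring⟩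
        · left
          have hc : IsCoprime q d := (Prime.coprime_iff_not_dvd hqP).mpr hqd
          exact (hs d).mpr ⟨hd0, hc.symm.dvd_of_dvd_mul_right hdMq⟩
    obtain ⟨hnd', hmem'⟩ := ih _ (M * q) (by positivity)
      (fun x hx => hP x (by simp [hx])) (PySem.Set.nodup_union _ _ hnd) hstep
    refine ⟨hnd', fun d => ?_⟩
    rw [hmem' d, mul_assoc]

theorem calculate_glist_main : ∀ (D : Int), 1 ≤ D → calculate_glist D = calculate_glist_alt D := by
  intro D hD
  by_cases h1 : D = 1
  · simp [calculate_glist, calculate_glist_alt, h1]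
  obtain ⟨hs1, hs2, hs3⟩ := pvS_spec D hD
  -- names for the two halves A's sorted list decomposes into, and the canonical
  -- strictly increasing divisor list T
  set small := (PySem.List.pyRange 1 (pvS D + 1) 1).filter (pvP D) with hsmall
  set large := ((PySem.List.pyRange 1 (pvS D + 1) 1).filter (pvQ D)).map (fun f => D / f) with hlarge
  set T := (PySem.List.pyRange 1 (D + 1) 1).filter (fun i => decide (D % i = 0)) with hT
  -- the sorted list A builds is small ++ large.reverse, which is strictly increasing
  have hpairs : List.Pairwise (fun a b => a < b) (small ++ large.reverse) := by
    rw [List.pairwise_append]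
    refine ⟨List.Pairwise.sublist List.filter_sublist (PySem.List.pairwise_lt_pyRange_one _ _), ?_, ?_⟩
    · rw [List.pairwise_reverse, hlarge, List.pairwise_map]
      refine List.Pairwise.imp_of_mem ?_
        (List.Pairwise.sublist List.filter_sublist (PySem.List.pairwise_lt_pyRange_one 1 (pvS D + 1)))
      intro a b hamem hbmem hab
      have hap := List.of_mem_filter hamem
      have hbp := List.of_mem_filter hbmem
      have ha := PySem.List.mem_pyRange_one.mp (List.mem_of_mem_filter hamem)
      have hb := PySem.List.mem_pyRange_one.mp (List.mem_of_mem_filter hbmem)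
      simp only [pvQ, Bool.and_eq_true, beq_iff_eq, bne_iff_ne] at hap hbp
      exact pvDivAnti D a b hD (by omega) hab
        (Int.dvd_of_emod_eq_zero hap.1) (Int.dvd_of_emod_eq_zero hbp.1)
    · intro a hamem b hbmem
      have ha := PySem.List.mem_pyRange_one.mp (List.mem_of_mem_filter hamem)
      rw [List.mem_reverse, hlarge, List.mem_map] at hbmem
      obtain ⟨g, hgmem, rfl⟩ := hbmem
      have hgp := List.of_mem_filter hgmem
      have hg := PySem.List.mem_pyRange_one.mp (List.mem_of_mem_filter hgmem)
      simp only [pvQ, Bool.and_eq_true, beq_iff_eq, bne_iff_ne] at hgp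
      have := pvCross D g hD (by omega) (by omega)
        (Int.dvd_of_emod_eq_zero hgp.1) hgp.2
      omega
  have hperm : (small ++ large.reverse).Perm
      ((PySem.List.pyRange 1 (pvS D + 1) 1).flatMap
        (fun f => (if pvP D f then [f] else []) ++ (if pvQ D f then [D / f] else []))) := by
    refine List.Perm.trans (List.Perm.append (List.Perm.refl small) (List.reverse_perm large)) ?_
    rw [hsmall, hlarge, ← pvFlatMapS D, ← pvFlatMapL D]
    exact (pvFlatMapPerm _ _ _).symm
  -- T is strictly increasing
  have hpairsT : List.Pairwise (fun a b : Int => a < b) T := by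
    rw [hT]
    exact List.Pairwise.sublist List.filter_sublist (PySem.List.pairwise_lt_pyRange_one _ _)
  -- T's members are exactly the positive divisors of D
  have hmemT : ∀ d : Int, d ∈ T ↔ 0 < d ∧ d ∣ D := by
    intro d
    rw [hT, List.mem_filter]
    constructor
    · rintro ⟨hr, hm⟩
      have h := PySem.List.mem_pyRange_one.mp hr
      rw [decide_eq_true_eq] at hm
      exact ⟨by omega, Int.dvd_of_emod_eq_zero hm⟩
    · rintro ⟨hd0, hdvd⟩
      have hle : d ≤ D := Int.le_of_dvd (by omega) hdvd
      exact ⟨PySem.List.mem_pyRange_one.mpr ⟨by omega, by omega⟩,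
        by simp [Int.emod_eq_zero_of_dvd hdvd]⟩
  -- small ++ large.reverse has the same members as T
  have hmem : ∀ d : Int, d ∈ small ++ large.reverse ↔ d ∈ T := by
    intro d
    rw [List.mem_append, List.mem_reverse, hmemT d]
    constructor
    · rintro (hs | hl)
      · have hp := List.of_mem_filter hs
        have hr := PySem.List.mem_pyRange_one.mp (List.mem_of_mem_filter hs)
        simp only [pvP, beq_iff_eq] at hp
        exact ⟨by omega, Int.dvd_of_emod_eq_zero hp⟩
      · rw [hlarge, List.mem_map] at hl
        obtain ⟨g, hgmem, rfl⟩ := hl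
        have hgp := List.of_mem_filter hgmem
        have hg := PySem.List.mem_pyRange_one.mp (List.mem_of_mem_filter hgmem)
        simp only [pvQ, Bool.and_eq_true, beq_iff_eq, bne_iff_ne] at hgp
        have hdvd : g ∣ D := Int.dvd_of_emod_eq_zero hgp.1
        obtain ⟨y, hy⟩ := hdvd
        have e0 : D / g = y := by rw [hy, Int.mul_ediv_cancel_left _ (by omega)]
        have hy1 : 1 ≤ y := by nlinarith
        exact ⟨by omega, by rw [e0]; exact ⟨g, by rw [hy]; ring⟩⟩
    · rintro ⟨hd0, hdvd⟩
      have hle : d ≤ D := Int.le_of_dvd (by omega) hdvd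
      have hmod : D % d = 0 := Int.emod_eq_zero_of_dvd hdvd
      by_cases hds : d ≤ pvS D
      · left
        rw [hsmall, List.mem_filter]
        exact ⟨PySem.List.mem_pyRange_one.mpr ⟨by omega, by omega⟩, by simp [pvP, hmod]⟩
      · right
        -- d is a large divisor: its cofactor y := D / d is ≤ √D and maps back to d
        push Not at hds
        obtain ⟨y, hy⟩ := hdvd
        have e0 : D / d = y := by rw [hy, Int.mul_ediv_cancel_left _ (by omega)]
        have hy1 : 1 ≤ y := by nlinarith
        have hys : y ≤ pvS D := by nlinarith
        have hyd : y ∣ D := ⟨d, by rw [hy]; ring⟩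
        have eb : D / y = d := by
          rw [hy, mul_comm, Int.mul_ediv_cancel_left _ (by omega)]
        have hne : y * y ≠ D := by
          intro hsq
          have : y = d := by
            rw [← eb, ← hsq, Int.mul_ediv_cancel_left _ (by omega)]
          omega
        rw [hlarge, List.mem_map]
        refine ⟨y, ?_, eb⟩
        rw [List.mem_filter]
        refine ⟨PySem.List.mem_pyRange_one.mpr ⟨by omega, by omega⟩, ?_⟩
        simp [pvQ, Int.emod_eq_zero_of_dvd hyd, hne]
  -- two strictly increasing lists with the same members are equal
  have hSLT : small ++ large.reverse = T := by
    have hnd1 : (small ++ large.reverse).Nodup := hpairs.imp (fun h => ne_of_lt h)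
    have hnd2 : T.Nodup := hpairsT.imp (fun h => ne_of_lt h)
    have hp : (small ++ large.reverse).Perm T :=
      (List.perm_ext_iff_of_nodup hnd1 hnd2).mpr hmem
    exact hp.eq_of_pairwise (fun a b _ _ h h' => (lt_asymm h h').elim) hpairs hpairsT
  -- T starts with the divisor 1
  have honeT : T = 1 :: (PySem.List.pyRange 2 (D + 1) 1).filter (fun i => decide (D % i = 0)) := by
    have hcons : PySem.List.pyRange 1 (D + 1) 1 = 1 :: PySem.List.pyRange 2 (D + 1) 1 := by
      have := PySem.List.pyRange_one_cons (a := 1) (b := D + 1) (by omega)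
      simpa using this
    rw [hT, hcons, List.filter_cons, if_pos (by simp)]
  set rest := (PySem.List.pyRange 2 (D + 1) 1).filter (fun i => decide (D % i = 0)) with hrest
  have hpairsR : List.Pairwise (fun a b : Int => a < b) rest := by
    have := hpairsT
    rw [honeT] at this
    exact this.of_cons
  have hndR : rest.Nodup := hpairsR.imp (fun h => ne_of_lt h)
  have hmemR : ∀ d : Int, d ∈ rest ↔ (0 < d ∧ d ∣ D) ∧ d ≠ 1 := by
    intro d
    constructor
    · intro hd
      have hdT : d ∈ T := by rw [honeT]; exact List.mem_cons_of_mem _ hd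
      refine ⟨(hmemT d).mp hdT, ?_⟩
      intro h1'
      subst h1'
      have := hpairsT
      rw [honeT, List.pairwise_cons] at this
      exact absurd (this.1 1 hd) (by omega)
    · rintro ⟨hdd, hne⟩
      have hdT : d ∈ T := (hmemT d).mpr hdd
      rw [honeT] at hdT
      rcases List.mem_cons.mp hdT with rfl | h
      · exact absurd rfl hne
      · exact h
  -- B's side: the factorisation loop yields a prime list with product D
  obtain ⟨L, hL, hprod, hprime⟩ := pvFactorLoopSpec (3 * D.toNat + 1) D 2 []
    (by omega) (by omega) (by omega) (by intro q h2 hlt _; omega) (by omega)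
  rw [List.nil_append] at hL
  -- the divisor-set fold then yields exactly the positive divisors of D
  have hs0 : ∀ d : Int, d ∈ PySem.Set.ofList [1] ↔ 0 < d ∧ d ∣ (1 : Int) := by
    intro d
    rw [PySem.Set.mem_ofList, List.mem_singleton]
    constructor
    · rintro rfl; exact ⟨one_pos, dvd_rfl⟩
    · rintro ⟨hd0, hd1⟩
      have := Int.isUnit_iff.mp (isUnit_of_dvd_one hd1)
      omega
  obtain ⟨hndF, hmemF⟩ := pvFoldSpec L (PySem.Set.ofList [1]) 1 one_pos hprime
    (PySem.Set.nodup_ofList _) hs0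
  simp only [one_mul, hprod] at hmemF
  -- discarding 1 gives a nodup list with the same members as rest
  have hpermB : rest.Perm
      (PySem.Set.discard (L.foldl (fun s q =>
        PySem.Set.union s (PySem.Set.ofList (List.map (fun d => d * q) s)))
        (PySem.Set.ofList [1])) 1) := by
    refine (List.perm_ext_iff_of_nodup hndR (PySem.Set.nodup_discard _ _ hndF)).mpr ?_
    intro d
    rw [hmemR d, PySem.Set.mem_discard, hmemF d]
  -- assemble: A = rest = B
  simp only [calculate_glist, calculate_glist_alt, if_neg h1]
  rw [show ((D.toNat.sqrt : Nat) : Int) = pvS D from rfl]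
  rw [pvAFold D]
  rw [PySem.List.sorted_eq_of_perm_of_pairwise_lt _ _ _ hperm hpairs]
  rw [hSLT, honeT, PySem.List.remove?_cons_self, Option.getD_some]
  rw [hL]
  rw [PySem.List.sorted_eq_of_perm_of_pairwise_lt _ _ _ hpermB hpairsR]

-- ===== VERDICT (by name: the statement is the Claim_ definition above) =====
theorem calculate_glist_spec : Claim_equal_calculate_glist := by
  intro D _ hP
  exact calculate_glist_main D hP
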